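-- pv_equiv track=rewrite | github.com/alfredsasko/unscramble-computer-science-problems | Task4.py | get_telemarketers
-- ===== SOURCE A (Python) =====
-- def get_telemarketers(record_list):
--     text_num_list, caller_list, reciever_list = [], [], []
--     for record in record_list:
--         caller, reciever = record[0].strip(), record[1].strip()
--         if is_text(record):
--             text_num_list.extend([caller, reciever])
--         elif is_call(record):
--             caller_list.append(caller)
--             reciever_list.append(reciever)
--         else:
--             raise Exception('Type of the record not recognized')
--
--     telemarketer_set = (set(caller_list)
--                         - (set(reciever_list)
--                            | set(text_num_list)))
--
--     return sorted(telemarketer_set)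
--
-- def is_text(record):
--     return len(record) == 3
--
-- def is_call(record):
--     return len(record) == 4
-- ===== SOURCE B (Python) =====
-- def get_telemarketers(record_list):
--     # sort-and-merge set difference: no hash sets anywhere
--     callers, excluded = [], []
--     for record in record_list:
--         if len(record) == 3:
--             excluded.append(record[0].strip())
--             excluded.append(record[1].strip())
--         elif len(record) == 4:
--             callers.append(record[0].strip())
--             excluded.append(record[1].strip())
--         else:
--             raise Exception('Type of the record not recognized')
--     callers.sort()
--     excluded.sort()
--     out = []
--     i = j = 0
--     while i < len(callers):
--         c = callers[i]
--         while j < len(excluded) and excluded[j] < c: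
--             j += 1
--         if not (j < len(excluded) and excluded[j] == c) and not (out and out[-1] == c):
--             out.append(c)
--         i += 1
--     return out
-- ===== Notes on version B (the rewrite author's own statement) =====
-- stated objective: alternative
-- what changed: Replaces A's hash-set difference/union followed by sorting with a sort-then-scan algorithm: B accumulates only a caller list and one combined exclusion list, sorts both, and produces the answer by a two-pointer merge that skips excluded numbers and deduplicates adjacent equal callers.
import Mathlib
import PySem

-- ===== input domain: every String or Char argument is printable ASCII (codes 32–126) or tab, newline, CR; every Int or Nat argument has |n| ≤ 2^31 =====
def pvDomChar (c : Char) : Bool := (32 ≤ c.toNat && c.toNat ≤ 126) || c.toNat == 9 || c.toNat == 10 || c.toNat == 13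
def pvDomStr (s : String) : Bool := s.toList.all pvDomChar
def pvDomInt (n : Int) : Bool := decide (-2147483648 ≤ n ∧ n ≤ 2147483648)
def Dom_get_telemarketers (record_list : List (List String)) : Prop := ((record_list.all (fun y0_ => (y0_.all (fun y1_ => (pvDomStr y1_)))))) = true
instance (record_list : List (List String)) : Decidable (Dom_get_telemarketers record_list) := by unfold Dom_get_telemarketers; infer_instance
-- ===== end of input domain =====

-- B replaces A's hash-set difference/union + final sort by a sort-then-scan algorithm:
-- one caller list and one combined exclusion list, both sorted, then a two-pointer merge
-- that skips excluded numbers and deduplicates adjacent equal callers (alternative, same cost).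

-- ===== PORT A =====
-- the for-loop of A: state (text_num_list, caller_list, reciever_list); none = an exception
def pvLoopA : List (List String) → List String × List String × List String →
    Option (List String × List String × List String)
  | [], st => some st
  | record :: rest, (texts, callers, recvs) =>
    match PySem.List.pyGet? record 0, PySem.List.pyGet? record 1 with
    | some s0, some s1 =>
      let caller := PySem.Str.strip s0
      let reciever := PySem.Str.strip s1
      if record.length = 3 then
        pvLoopA rest (texts ++ [caller, reciever], callers, recvs)
      else if record.length = 4 then
        pvLoopA rest (texts, callers ++ [caller], recvs ++ [reciever])
      else none   -- raise Exception('Type of the record not recognized')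
    | _, _ => none   -- IndexError on record[0] / record[1]

def get_telemarketers (record_list : List (List String)) : List String :=
  match pvLoopA record_list ([], [], []) with
  | none => []   -- unreachable under Pre_
  | some (texts, callers, recvs) =>
      PySem.List.sorted
        (PySem.Set.diff (PySem.Set.ofList callers)
          (PySem.Set.union (PySem.Set.ofList recvs) (PySem.Set.ofList texts)))
        (fun x => x) false

-- ===== PORT B =====
-- B's for-loop: state (callers, excluded); none = an exception
def pvLoopB : List (List String) → List String × List String →
    Option (List String × List String)
  | [], st => some st
  | record :: rest, (callers, excluded) =>
    if record.length = 3 then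
      match record with
      | s0 :: s1 :: _ =>
        pvLoopB rest (callers, excluded ++ [PySem.Str.strip s0, PySem.Str.strip s1])
      | _ => none   -- unreachable: length = 3
    else if record.length = 4 then
      match record with
      | s0 :: s1 :: _ =>
        pvLoopB rest (callers ++ [PySem.Str.strip s0], excluded ++ [PySem.Str.strip s1])
      | _ => none   -- unreachable: length = 4
    else none   -- raise Exception('Type of the record not recognized')

-- inner while loop: advance j while excluded[j] < c  (the remaining suffix of excluded)
def pvSkip : List String → String → List String
  | [], _ => []
  | e :: es, c => if e < c then pvSkip es c else e :: es

-- outer while loop over the sorted callers with accumulator out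
def pvMerge : List String → List String → List String → List String
  | [], _, out => out
  | c :: cs, es, out =>
    let es' := pvSkip es c
    if es'.head? = some c ∨ out.getLast? = some c then pvMerge cs es' out
    else pvMerge cs es' (out ++ [c])

def get_telemarketers_alt (record_list : List (List String)) : List String :=
  match pvLoopB record_list ([], []) with
  | none => []   -- unreachable under Pre_
  | some (callers, excluded) =>
      pvMerge (PySem.List.sorted callers (fun x => x) false)
        (PySem.List.sorted excluded (fun x => x) false) []

-- ===== PRECONDITION & SPEC =====
-- Pre_ excludes exactly the inputs on which A raises: a record of length ≠ 3, 4
-- (IndexError if shorter than 2, otherwise the explicit Exception).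
def Pre_get_telemarketers (record_list : List (List String)) : Prop :=
  ∀ r ∈ record_list, r.length = 3 ∨ r.length = 4
instance (record_list : List (List String)) : Decidable (Pre_get_telemarketers record_list) := by
  unfold Pre_get_telemarketers; infer_instance

def pvWitness_get_telemarketers : List (List String) :=
  [[" 1 ", "2", "t"], ["2", "3", "x", "y"], ["1", "4", "x", "y"]]

def Spec_get_telemarketers (record_list : List (List String)) (out : List String) : Prop := out = get_telemarketers_alt record_list
instance (record_list : List (List String)) (out : List String) : Decidable (Spec_get_telemarketers record_list out) := by unfold Spec_get_telemarketers; infer_instance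

-- ===== CLAIM (what is proved, stated in full; the proofs are below) =====
def Claim_equal_get_telemarketers : Prop := ∀ (record_list : List (List String)), Dom_get_telemarketers record_list → Pre_get_telemarketers record_list → Spec_get_telemarketers record_list (get_telemarketers record_list)

-- ===== LEMMAS AND PROOFS =====

-- closed forms of what each loop appends
def pvTextsOf : List (List String) → List String
  | [] => []
  | r :: rest =>
    (match r with
     | s0 :: s1 :: _ => if r.length = 3 then [PySem.Str.strip s0, PySem.Str.strip s1] else []
     | _ => []) ++ pvTextsOf rest

def pvCallersOf : List (List String) → List String
  | [] => []
  | r :: rest =>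
    (match r with
     | s0 :: _ :: _ => if r.length = 4 then [PySem.Str.strip s0] else []
     | _ => []) ++ pvCallersOf rest

def pvRecvsOf : List (List String) → List String
  | [] => []
  | r :: rest =>
    (match r with
     | _ :: s1 :: _ => if r.length = 4 then [PySem.Str.strip s1] else []
     | _ => []) ++ pvRecvsOf rest

def pvExcOf : List (List String) → List String
  | [] => []
  | r :: rest =>
    (match r with
     | s0 :: s1 :: _ =>
       if r.length = 3 then [PySem.Str.strip s0, PySem.Str.strip s1]
       else if r.length = 4 then [PySem.Str.strip s1] else []
     | _ => []) ++ pvExcOf rest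

theorem pvLoopA_closed (rl : List (List String)) :
    ∀ texts callers recvs, (∀ r ∈ rl, r.length = 3 ∨ r.length = 4) →
    pvLoopA rl (texts, callers, recvs) =
      some (texts ++ pvTextsOf rl, callers ++ pvCallersOf rl, recvs ++ pvRecvsOf rl) := by
  induction rl with
  | nil => intro t c r _; simp [pvLoopA, pvTextsOf, pvCallersOf, pvRecvsOf]
  | cons record rest ih =>
    intro t c r hpre
    have hlen := hpre record (List.mem_cons_self ..)
    obtain ⟨s0, s1, tl, rfl⟩ : ∃ s0 s1 tl, record = s0 :: s1 :: tl := by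
      match record, hlen with
      | s0 :: s1 :: tl, _ => exact ⟨s0, s1, tl, rfl⟩
    have hpre' : ∀ r ∈ rest, r.length = 3 ∨ r.length = 4 := fun r hr => hpre r (by simp [hr])
    rcases hlen with h3 | h4
    · simp [pvLoopA, PySem.List.pyGet?, PySem.List.pyIdx?, h3, ih _ _ _ hpre', pvTextsOf, pvCallersOf, pvRecvsOf]
    · have h3' : ¬ ((s0 :: s1 :: tl).length = 3) := by omega
      simp [pvLoopA, PySem.List.pyGet?, PySem.List.pyIdx?, h4, ih _ _ _ hpre',
        pvTextsOf, pvCallersOf, pvRecvsOf]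

theorem pvLoopB_closed (rl : List (List String)) :
    ∀ callers excluded, (∀ r ∈ rl, r.length = 3 ∨ r.length = 4) →
    pvLoopB rl (callers, excluded) =
      some (callers ++ pvCallersOf rl, excluded ++ pvExcOf rl) := by
  induction rl with
  | nil => intro c e _; simp [pvLoopB, pvCallersOf, pvExcOf]
  | cons record rest ih =>
    intro c e hpre
    have hlen := hpre record (List.mem_cons_self ..)
    obtain ⟨s0, s1, tl, rfl⟩ : ∃ s0 s1 tl, record = s0 :: s1 :: tl := by
      match record, hlen with
      | s0 :: s1 :: tl, _ => exact ⟨s0, s1, tl, rfl⟩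
    have hpre' : ∀ r ∈ rest, r.length = 3 ∨ r.length = 4 := fun r hr => hpre r (by simp [hr])
    rcases hlen with h3 | h4
    · simp [pvLoopB, h3, ih _ _ hpre', pvCallersOf, pvExcOf]
    · have h3' : ¬ ((s0 :: s1 :: tl).length = 3) := by omega
      simp [pvLoopB, h4, ih _ _ hpre', pvCallersOf, pvExcOf]

theorem pvExc_mem (rl : List (List String)) (x : String) :
    x ∈ pvExcOf rl ↔ x ∈ pvTextsOf rl ∨ x ∈ pvRecvsOf rl := by
  induction rl with
  | nil => simp [pvExcOf, pvTextsOf, pvRecvsOf]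
  | cons record rest ih =>
    match record with
    | [] => simpa [pvExcOf, pvTextsOf, pvRecvsOf] using ih
    | [s0] => simpa [pvExcOf, pvTextsOf, pvRecvsOf] using ih
    | s0 :: s1 :: tl =>
      by_cases h3 : (s0 :: s1 :: tl).length = 3
      · simp [pvExcOf, pvTextsOf, pvRecvsOf, h3, ih]; tauto
      · by_cases h4 : (s0 :: s1 :: tl).length = 4
        · simp [pvExcOf, pvTextsOf, pvRecvsOf, h4, ih]; tauto
        · simp only [List.length_cons] at h3 h4
          have h1 : ¬ tl.length = 1 := by omega
          have h2 : ¬ tl.length = 2 := by omega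
          simp [pvExcOf, pvTextsOf, pvRecvsOf, h1, h2, ih]

-- pvSkip facts
theorem pvSkip_sublist (es : List String) (c : String) : (pvSkip es c).Sublist es := by
  induction es with
  | nil => simp [pvSkip]
  | cons e es ih =>
    simp only [pvSkip]
    split_ifs
    · exact ih.trans (List.sublist_cons_self e es)
    · exact List.Sublist.refl _

theorem pvSkip_mem (es : List String) (c x : String) (hx : ¬ x < c) :
    x ∈ pvSkip es c ↔ x ∈ es := by
  induction es with
  | nil => simp [pvSkip]
  | cons e es ih =>
    simp only [pvSkip]
    split_ifs with h
    · rw [ih]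
      constructor
      · exact fun hm => List.mem_cons_of_mem _ hm
      · intro hm
        rcases List.mem_cons.mp hm with rfl | hm
        · exact absurd h hx
        · exact hm
    · rfl

theorem pvSkip_head_not_lt (es : List String) (c h : String)
    (hh : (pvSkip es c).head? = some h) : ¬ h < c := by
  induction es with
  | nil => simp [pvSkip] at hh
  | cons e es ih =>
    simp only [pvSkip] at hh
    split_ifs at hh with he
    · exact ih hh
    · simp only [List.head?_cons, Option.some.injEq] at hh
      subst hh; exact he

theorem pvSkip_head_iff (es : List String) (c : String) (hs : es.Pairwise (· ≤ ·)) :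
    (pvSkip es c).head? = some c ↔ c ∈ es := by
  constructor
  · intro hh
    have : c ∈ pvSkip es c := by
      cases hes : pvSkip es c with
      | nil => simp [hes] at hh
      | cons a t => simp [hes] at hh; simp [hh]
    exact (pvSkip_sublist es c).mem this
  · intro hc
    have hmem : c ∈ pvSkip es c := (pvSkip_mem es c c (lt_irrefl c)).mpr hc
    cases hes : pvSkip es c with
    | nil => simp [hes] at hmem
    | cons a t =>
      have hnlt : ¬ a < c := pvSkip_head_not_lt es c a (by simp [hes])
      have hsk : (a :: t).Pairwise (fun x y => x ≤ y) := by
        rw [← hes]; exact hs.sublist (pvSkip_sublist es c)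
      have hac : a ≤ c := by
        rw [hes] at hmem
        rcases List.mem_cons.mp hmem with rfl | hm
        · exact le_refl _
        · exact (List.pairwise_cons.mp hsk).1 c hm
      have : a = c := le_antisymm hac (not_lt.mp hnlt)
      simp [this]

-- a strictly increasing accumulator whose elements are ≤ c contains c iff c is its last element
theorem pvLast_iff (out : List String) (c : String) (hout : out.Pairwise (· < ·))
    (hle : ∀ p ∈ out, p ≤ c) : out.getLast? = some c ↔ c ∈ out := by
  constructor
  · intro h; exact List.mem_of_getLast? h
  · intro hc
    cases hlast : out.getLast? with
    | none => rw [List.getLast?_eq_none_iff] at hlast; simp [hlast] at hc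
    | some L =>
      have hLmem : L ∈ out := List.mem_of_getLast? hlast
      have hLc : L ≤ c := hle L hLmem
      have hcL : c ≤ L := by
        rcases List.getLast?_eq_some_iff.mp hlast with ⟨ys, rfl⟩
        rcases (List.mem_append.mp hc) with hy | hm
        · have := (List.pairwise_append.mp hout).2.2 c hy L (by simp)
          exact le_of_lt this
        · simp at hm; exact le_of_eq hm
      simp [le_antisymm hcL hLc]

-- main merge lemma: result is strictly increasing and has the stated membership
theorem pvMerge_spec (cs : List String) : ∀ es out,
    cs.Pairwise (· ≤ ·) → es.Pairwise (· ≤ ·) → out.Pairwise (· < ·) →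
    (∀ p ∈ out, ∀ x ∈ cs, p ≤ x) →
    (pvMerge cs es out).Pairwise (· < ·) ∧
    (∀ x, x ∈ pvMerge cs es out ↔ x ∈ out ∨ (x ∈ cs ∧ x ∉ es ∧ x ∉ out)) := by
  induction cs with
  | nil =>
    intro es out _ _ hout _
    refine ⟨hout, fun x => ?_⟩
    simp [pvMerge]
  | cons c cs ih =>
    intro es out hcs hes hout hle
    have hcs' := (List.pairwise_cons.mp hcs).2
    have hcx : ∀ x ∈ cs, c ≤ x := (List.pairwise_cons.mp hcs).1
    have hes' : (pvSkip es c).Pairwise (· ≤ ·) := hes.sublist (pvSkip_sublist es c)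
    have hheadiff := pvSkip_head_iff es c hes
    have hlastiff := pvLast_iff out c hout (fun p hp => hle p hp c (List.mem_cons_self ..))
    -- membership of elements of cs in es vs skipped es
    have hskip : ∀ x ∈ cs, (x ∈ pvSkip es c ↔ x ∈ es) := by
      intro x hx
      exact pvSkip_mem es c x (not_lt.mpr (hcx x hx))
    have hcskip : c ∈ pvSkip es c ↔ c ∈ es := pvSkip_mem es c c (lt_irrefl c)
    simp only [pvMerge]
    split_ifs with hcond
    · -- skip c: c ∈ es or c ∈ out
      have hcm : c ∈ es ∨ c ∈ out := by
        rcases hcond with h | h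
        · exact Or.inl (hheadiff.mp h)
        · exact Or.inr (hlastiff.mp h)
      obtain ⟨hp, hm⟩ := ih (pvSkip es c) out hcs' hes' hout
        (fun p hp x hx => hle p hp x (List.mem_cons_of_mem _ hx))
      refine ⟨hp, fun x => ?_⟩
      rw [hm x]
      by_cases hxc : x = c
      · subst hxc
        constructor
        · rintro (h | ⟨_, hns, hno⟩)
          · exact Or.inl h
          · rcases hcm with h | h
            · exact absurd (hcskip.mpr h) hns
            · exact absurd h hno
        · rintro (h | ⟨_, hns, hno⟩)
          · exact Or.inl h
          · rcases hcm with h | h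
            · exact absurd h hns
            · exact absurd h hno
      · constructor
        · rintro (h | ⟨hxcs, hns, hno⟩)
          · exact Or.inl h
          · exact Or.inr ⟨List.mem_cons_of_mem _ hxcs,
              fun hes0 => hns ((hskip x hxcs).mpr hes0), hno⟩
        · rintro (h | ⟨hxcc, hns, hno⟩)
          · exact Or.inl h
          · have hxcs : x ∈ cs := by
              rcases List.mem_cons.mp hxcc with h | h
              · exact absurd h hxc
              · exact h
            exact Or.inr ⟨hxcs, fun hs => hns ((hskip x hxcs).mp hs), hno⟩
    · -- append c: c ∉ es and c ∉ out
      rw [not_or] at hcond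
      have hcnes : c ∉ es := fun h => hcond.1 (hheadiff.mpr h)
      have hcnout : c ∉ out := fun h => hcond.2 (hlastiff.mpr h)
      have hout' : (out ++ [c]).Pairwise (· < ·) := by
        rw [List.pairwise_append]
        refine ⟨hout, List.pairwise_singleton _ _, fun p hp y hy => ?_⟩
        rw [List.mem_singleton] at hy; rw [hy]
        exact lt_of_le_of_ne (hle p hp c (List.mem_cons_self ..)) (fun h => hcnout (h ▸ hp))
      have hle' : ∀ p ∈ out ++ [c], ∀ x ∈ cs, p ≤ x := by
        intro p hp x hx
        rcases List.mem_append.mp hp with h | h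
        · exact hle p h x (List.mem_cons_of_mem _ hx)
        · simp at h; subst h; exact hcx x hx
      obtain ⟨hp, hm⟩ := ih (pvSkip es c) (out ++ [c]) hcs' hes' hout' hle'
      refine ⟨hp, fun x => ?_⟩
      rw [hm x]
      by_cases hxc : x = c
      · subst hxc
        constructor
        · intro _; exact Or.inr ⟨List.mem_cons_self .., hcnes, hcnout⟩
        · intro _; exact Or.inl (List.mem_append.mpr (Or.inr (List.mem_singleton.mpr rfl)))
      · have hx1 : x ∈ out ++ [c] ↔ x ∈ out := by simp [hxc]
        constructor
        · rintro (h | ⟨hxcs, hns, hno⟩)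
          · exact Or.inl (hx1.mp h)
          · exact Or.inr ⟨List.mem_cons_of_mem _ hxcs,
              fun hes0 => hns ((hskip x hxcs).mpr hes0), fun h => hno (hx1.mpr h)⟩
        · rintro (h | ⟨hxcc, hns, hno⟩)
          · exact Or.inl (hx1.mpr h)
          · have hxcs : x ∈ cs := by
              rcases List.mem_cons.mp hxcc with h | h
              · exact absurd h hxc
              · exact h
            exact Or.inr ⟨hxcs, fun hs => hns ((hskip x hxcs).mp hs),
              fun h => hno (hx1.mp h)⟩

-- ===== VERDICT (by name: the statement is the Claim_ definition above) =====
theorem get_telemarketers_spec : Claim_equal_get_telemarketers := by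
  intro record_list _ hpre
  unfold Spec_get_telemarketers get_telemarketers get_telemarketers_alt
  rw [pvLoopA_closed record_list [] [] [] hpre, pvLoopB_closed record_list [] [] hpre]
  simp only [List.nil_append]
  set C := pvCallersOf record_list
  set E := pvExcOf record_list
  set T := pvTextsOf record_list
  set R := pvRecvsOf record_list
  obtain ⟨hpair, hmem⟩ := pvMerge_spec (PySem.List.sorted C (fun x => x) false)
      (PySem.List.sorted E (fun x => x) false) []
      (PySem.List.sorted_pairwise C (fun x => x))
      (PySem.List.sorted_pairwise E (fun x => x))
      (List.Pairwise.nil) (by simp)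
  set ys := pvMerge (PySem.List.sorted C (fun x => x) false)
      (PySem.List.sorted E (fun x => x) false) []
  set D := PySem.Set.diff (PySem.Set.ofList C)
      (PySem.Set.union (PySem.Set.ofList R) (PySem.Set.ofList T))
  have hysmem : ∀ x, x ∈ ys ↔ x ∈ D := by
    intro x
    rw [hmem x]
    simp only [List.not_mem_nil, false_or,
      PySem.List.mem_sorted]
    rw [PySem.Set.mem_diff, PySem.Set.mem_union, PySem.Set.mem_ofList,
      PySem.Set.mem_ofList, PySem.Set.mem_ofList, pvExc_mem]
    tauto
  have hysnd : ys.Nodup := hpair.imp ne_of_lt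
  have hDnd : D.Nodup := PySem.Set.nodup_diff _ _ (PySem.Set.nodup_ofList _)
  have hperm : ys.Perm D := (List.perm_ext_iff_of_nodup hysnd hDnd).mpr hysmem
  exact PySem.List.sorted_eq_of_perm_of_pairwise_lt _ _ _ hperm hpair
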